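-- pv_equiv track=rewrite | github.com/zuevik/KiaFinalProjectQA | webtest_package/helpers/base.py | converter_of_name
-- ===== SOURCE A (Python) =====
-- def converter_of_name(button_name):
--     button_name = button_name.lower().strip()
--     if (button_name == 'wszystkie' or button_name =='nowe' or button_name =='hybrydowe'
--             or button_name =='elektryczne' or button_name =='miejskie' or button_name =='rodzinne'):
--         button_name = button_name.capitalize()
--     elif button_name == 'suv/crossover':
--         result = ''
--         for index, char in enumerate(button_name):
--             if index in [0, 1, 2, 4]:
--                 result += char.upper()
--             else:
--                 result += char
--         button_name = result
--     return button_name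
-- ===== SOURCE B (Python) =====
-- def converter_of_name(button_name):
--     button_name = button_name.lower().strip()
--     mapping = {
--         'wszystkie': 'Wszystkie',
--         'nowe': 'Nowe',
--         'hybrydowe': 'Hybrydowe',
--         'elektryczne': 'Elektryczne',
--         'miejskie': 'Miejskie',
--         'rodzinne': 'Rodzinne',
--         'suv/crossover': 'SUV/Crossover',
--     }
--     return mapping.get(button_name, button_name)
-- ===== Notes on version B (the rewrite author's own statement) =====
-- stated objective: simpler
-- what changed: Replaces the if/elif chain with its capitalize() call and index-driven character loop by a single lookup in a precomputed normalized-name-to-display-name table.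
import Mathlib
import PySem

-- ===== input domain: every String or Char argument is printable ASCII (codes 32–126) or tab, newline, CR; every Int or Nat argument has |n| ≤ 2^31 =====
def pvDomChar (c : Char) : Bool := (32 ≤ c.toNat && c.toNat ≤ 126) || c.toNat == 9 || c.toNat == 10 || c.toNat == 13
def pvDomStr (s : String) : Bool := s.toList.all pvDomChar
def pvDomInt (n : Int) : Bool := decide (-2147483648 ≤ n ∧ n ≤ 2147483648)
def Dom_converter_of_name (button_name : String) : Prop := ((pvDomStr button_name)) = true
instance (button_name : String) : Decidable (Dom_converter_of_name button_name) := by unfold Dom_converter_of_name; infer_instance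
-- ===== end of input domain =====

-- B replaces A's branch chain + character loop by one table lookup (simpler).


-- ===== PORT A =====
-- str.capitalize: first char uppercased, rest lowercased (exact on ASCII)
def pyCapitalize (s : String) : String :=
  match s.toList with
  | [] => ""
  | c :: cs => String.ofList (PySem.Chars.upperChar c :: cs.map PySem.Chars.lowerChar)

def converter_of_name (button_name : String) : String :=
  let n := PySem.Str.strip (PySem.Str.lower button_name)
  if n == "wszystkie" || n == "nowe" || n == "hybrydowe" || n == "elektryczne"
      || n == "miejskie" || n == "rodzinne" then
    pyCapitalize n
  else if n == "suv/crossover" then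
    (PySem.List.enumerate n.toList 0).foldl
      (fun r (p : Int × Char) =>
        if p.1 ∈ ([0, 1, 2, 4] : List Int) then r ++ String.ofList [PySem.Chars.upperChar p.2]
        else r ++ String.ofList [p.2]) ""
  else n

-- ===== PORT B =====
def converter_of_name_alt (button_name : String) : String :=
  let n := PySem.Str.strip (PySem.Str.lower button_name)
  (PySem.Dict.ofList [("wszystkie", "Wszystkie"), ("nowe", "Nowe"),
    ("hybrydowe", "Hybrydowe"), ("elektryczne", "Elektryczne"),
    ("miejskie", "Miejskie"), ("rodzinne", "Rodzinne"),
    ("suv/crossover", "SUV/Crossover")]).getD n n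

-- ===== PRECONDITION & SPEC =====
def Spec_converter_of_name (button_name : String) (out : String) : Prop := out = converter_of_name_alt button_name
instance (button_name : String) (out : String) : Decidable (Spec_converter_of_name button_name out) := by unfold Spec_converter_of_name; infer_instance

-- ===== CLAIM (what is proved, stated in full; the proofs are below) =====
def Claim_equal_converter_of_name : Prop := ∀ (button_name : String), Dom_converter_of_name button_name → Spec_converter_of_name button_name (converter_of_name button_name)

-- ===== LEMMAS AND PROOFS =====
theorem body_eq (n : String) :
    (if n == "wszystkie" || n == "nowe" || n == "hybrydowe" || n == "elektryczne"
        || n == "miejskie" || n == "rodzinne" then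
      pyCapitalize n
    else if n == "suv/crossover" then
      (PySem.List.enumerate n.toList 0).foldl
        (fun r (p : Int × Char) =>
          if p.1 ∈ ([0, 1, 2, 4] : List Int) then r ++ String.ofList [PySem.Chars.upperChar p.2]
          else r ++ String.ofList [p.2]) ""
    else n)
    = (PySem.Dict.ofList [("wszystkie", "Wszystkie"), ("nowe", "Nowe"),
        ("hybrydowe", "Hybrydowe"), ("elektryczne", "Elektryczne"),
        ("miejskie", "Miejskie"), ("rodzinne", "Rodzinne"),
        ("suv/crossover", "SUV/Crossover")]).getD n n := by
  by_cases h1 : n = "wszystkie"; · subst h1; decide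
  by_cases h2 : n = "nowe"; · subst h2; decide
  by_cases h3 : n = "hybrydowe"; · subst h3; decide
  by_cases h4 : n = "elektryczne"; · subst h4; decide
  by_cases h5 : n = "miejskie"; · subst h5; decide
  by_cases h6 : n = "rodzinne"; · subst h6; decide
  by_cases h7 : n = "suv/crossover"; · subst h7; decide
  have f1 : ("wszystkie" == n) = false := beq_eq_false_iff_ne.mpr (Ne.symm h1)
  have f2 : ("nowe" == n) = false := beq_eq_false_iff_ne.mpr (Ne.symm h2)
  have f3 : ("hybrydowe" == n) = false := beq_eq_false_iff_ne.mpr (Ne.symm h3)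
  have f4 : ("elektryczne" == n) = false := beq_eq_false_iff_ne.mpr (Ne.symm h4)
  have f5 : ("miejskie" == n) = false := beq_eq_false_iff_ne.mpr (Ne.symm h5)
  have f6 : ("rodzinne" == n) = false := beq_eq_false_iff_ne.mpr (Ne.symm h6)
  have f7 : ("suv/crossover" == n) = false := beq_eq_false_iff_ne.mpr (Ne.symm h7)
  simp [PySem.Dict.ofList, PySem.Dict.getD, PySem.Dict.get?, PySem.Dict.update,
    PySem.Dict.insert, PySem.Dict.empty, PySem.Dict.contains, List.find?,
    h1, h2, h3, h4, h5, h6, h7, f1, f2, f3, f4, f5, f6, f7]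

-- ===== VERDICT (by name: the statement is the Claim_ definition above) =====
theorem converter_of_name_spec : Claim_equal_converter_of_name := by
  intro bn _
  unfold Spec_converter_of_name converter_of_name converter_of_name_alt
  exact body_eq _
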